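-- pv_equiv track=rewrite | github.com/LDIOPBSF/CSSampling | src/LDIOPBSF.py | positionSet
-- ===== SOURCE A (Python) =====
-- def intersection(itemset1,itemset2):
--     itemset1=itemset1.split()#[:-1]
--     itemset2=itemset2.split()#[:-1]
--     itemset=[]
--     for item in itemset1:
--         if item in itemset2:
--             itemset.append(item)
--     return ' '.join(itemset)+' '
--
-- def positionSet(sequence, itemset):
-- 	ps,i=[], 0
-- 	x=len(sequence)
-- 	#print "sequence, itemset",sequence, itemset
-- 	while i<x:
-- 		intersec=intersection(sequence[i],itemset)
-- 		if intersec !=' ':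
-- 			k,nL,chaine=i+1,len(ps), intersec
-- 			while k < x and chaine not in intersection(sequence[k],itemset):
-- 				k+=1
-- 			if k==x:
-- 				ps.append(i)
-- 		i+=1
-- 	return ps
-- ===== SOURCE B (Python) =====
-- def positionSet(sequence, itemset):
--     words2 = itemset.split()
--     later, res = [], []
--     for i, s in reversed(list(enumerate(sequence))):
--         intersec = ' '.join(w for w in s.split() if w in words2) + ' '
--         if intersec != ' ' and not any(intersec in L for L in later):
--             res.append(i)
--         later.append(intersec)
--     res.reverse()
--     return res
-- ===== Notes on version B (the rewrite author's own statement) =====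
-- stated objective: faster
-- what changed: A scans forward and, for every candidate index, rescans all later elements recomputing their intersections; B makes one backward pass that keeps the already-computed later intersection strings in an accumulator and tests each candidate against it, computing each intersection exactly once.
import Mathlib
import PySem

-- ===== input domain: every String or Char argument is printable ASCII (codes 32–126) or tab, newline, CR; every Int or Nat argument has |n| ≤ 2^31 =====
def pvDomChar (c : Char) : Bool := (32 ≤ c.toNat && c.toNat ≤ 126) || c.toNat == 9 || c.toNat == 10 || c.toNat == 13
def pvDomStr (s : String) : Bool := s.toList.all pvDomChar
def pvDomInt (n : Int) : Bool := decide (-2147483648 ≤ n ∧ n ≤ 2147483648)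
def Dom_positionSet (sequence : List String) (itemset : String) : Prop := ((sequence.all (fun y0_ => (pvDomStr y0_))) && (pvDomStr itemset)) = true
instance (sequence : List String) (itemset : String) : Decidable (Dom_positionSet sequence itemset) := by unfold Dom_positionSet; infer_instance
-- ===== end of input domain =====

-- B replaces A's per-index forward rescan (which recomputes the later intersections) by one
-- backward pass keeping the already-computed later intersection strings in an accumulator
-- (objective: faster — each intersection is computed once instead of once per inner-scan step).

-- ===== PORT A =====
-- intersection(itemset1, itemset2): split both, keep words of the first that occur in the
-- second (append loop), join with ' ' and add a trailing ' '.  Done on List Char.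
def interA (s1 s2 : List Char) : List Char :=
  PySem.Chars.join [' ']
    ((PySem.Chars.split₀ s1).foldl
      (fun acc item => if item ∈ PySem.Chars.split₀ s2 then acc ++ [item] else acc) []) ++ [' ']

-- inner 'while k < x and chaine not in intersection(sequence[k], itemset): k += 1'
def innerA (seq : List (List Char)) (its chaine : List Char) (x k : Int) : Int :=
  if h : k < x ∧ PySem.Chars.isIn chaine (interA (PySem.List.pyGetD seq k []) its) = false then
    innerA seq its chaine x (k + 1)
  else k
termination_by (x - k).toNat
decreasing_by omega

-- outer 'while i < x' loop with accumulator ps ('intersec' appears inline)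
def outerA (seq : List (List Char)) (its : List Char) (x i : Int) (ps : List Int) : List Int :=
  if _h : i < x then
    outerA seq its x (i + 1)
      (if interA (PySem.List.pyGetD seq i []) its ≠ [' '] then
         (if innerA seq its (interA (PySem.List.pyGetD seq i []) its) x (i + 1) = x then
            ps ++ [i] else ps)
       else ps)
  else ps
termination_by (x - i).toNat
decreasing_by omega

def positionSet (sequence : List String) (itemset : String) : List Int :=
  outerA (sequence.map String.toList) itemset.toList (sequence.length : Int) 0 []

-- ===== PORT B =====
-- ' '.join(w for w in s.split() if w in words2) + ' '  (words2 = itemset.split(), computed once)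
def interB (s1 : List Char) (words2 : List (List Char)) : List Char :=
  PySem.Chars.join [' ']
    ((PySem.Chars.split₀ s1).filter (fun w => decide (w ∈ words2))) ++ [' ']

-- backward pass over reversed(list(enumerate(sequence))) carrying (later, res), both grown by
-- append; res (collected in descending index order) is reversed at the end.
def positionSet_alt (sequence : List String) (itemset : String) : List Int :=
  (((((List.range sequence.length).map (fun (n : Nat) => (n : Int))).zip
      (sequence.map String.toList)).reverse.foldl
    (fun (st : List (List Char) × List Int) p =>
      (st.1 ++ [interB p.2 (PySem.Chars.split₀ itemset.toList)],
       if interB p.2 (PySem.Chars.split₀ itemset.toList) ≠ [' '] ∧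
          ∀ L ∈ st.1, PySem.Chars.isIn (interB p.2 (PySem.Chars.split₀ itemset.toList)) L = false
       then st.2 ++ [p.1] else st.2)) ([], [])).2).reverse

-- ===== PRECONDITION & SPEC =====
def Spec_positionSet (sequence : List String) (itemset : String) (out : List Int) : Prop := out = positionSet_alt sequence itemset
instance (sequence : List String) (itemset : String) (out : List Int) : Decidable (Spec_positionSet sequence itemset out) := by unfold Spec_positionSet; infer_instance

-- ===== CLAIM (what is proved, stated in full; the proofs are below) =====
def Claim_equal_positionSet : Prop := ∀ (sequence : List String) (itemset : String), Dom_positionSet sequence itemset → Spec_positionSet sequence itemset (positionSet sequence itemset)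

-- ===== LEMMAS AND PROOFS =====

-- the two intersection helpers agree
lemma interA_eq_interB (s1 s2 : List Char) : interA s1 s2 = interB s1 (PySem.Chars.split₀ s2) := by
  simp only [interA, interB, PySem.List.foldl_append_ite_eq_filter]
  simp

-- reference function: keep index i (of element s) iff interB s ≠ " " and no later element's
-- intersection contains it as a substring
def specPS (w2 : List (List Char)) : List (List Char) → Int → List Int
  | [], _ => []
  | s :: rest, i =>
      if interB s w2 ≠ [' '] ∧ ∀ t ∈ rest, PySem.Chars.isIn (interB s w2) (interB t w2) = false
      then i :: specPS w2 rest (i + 1) else specPS w2 rest (i + 1)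

lemma innerA_eq_x_iff (seq : List (List Char)) (its chaine : List Char) (k : Nat)
    (hk : k ≤ seq.length) :
    (innerA seq its chaine (seq.length : Int) (k : Int) = (seq.length : Int)) ↔
      ∀ t ∈ seq.drop k, PySem.Chars.isIn chaine (interA t its) = false := by
  induction hn : seq.length - k generalizing k with
  | zero =>
      have hk' : k = seq.length := by omega
      subst hk'
      rw [innerA]
      simp
  | succ n ih =>
      have hlt : k < seq.length := by omega
      have hdrop : seq.drop k = seq[k] :: seq.drop (k + 1) := List.drop_eq_getElem_cons hlt
      have hget : PySem.List.pyGetD seq (k : Int) [] = seq[k] := by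
        rw [PySem.List.pyGetD_natCast, List.getD_eq_getElem seq [] hlt]
      rw [innerA]
      by_cases hc : PySem.Chars.isIn chaine (interA seq[k] its) = false
      · rw [dif_pos ⟨by exact_mod_cast hlt, by rw [hget]; exact hc⟩]
        have hcast : (k : Int) + 1 = ((k + 1 : Nat) : Int) := by push_cast; ring
        rw [hcast, ih (k + 1) (by omega) (by omega)]
        constructor
        · intro h t ht
          rw [hdrop] at ht
          rcases List.mem_cons.mp ht with rfl | ht'
          · exact hc
          · exact h t ht'
        · intro h t ht
          exact h t (by rw [hdrop]; exact List.mem_cons_of_mem _ ht)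
      · rw [dif_neg (by rw [hget]; tauto)]
        constructor
        · intro h; exfalso; omega
        · intro h
          exact absurd (h seq[k] (by rw [hdrop]; exact List.mem_cons_self)) hc

lemma outerA_eq (seq : List (List Char)) (its : List Char) (k : Nat) (hk : k ≤ seq.length)
    (ps : List Int) :
    outerA seq its (seq.length : Int) (k : Int) ps = ps ++ specPS (PySem.Chars.split₀ its) (seq.drop k) (k : Int) := by
  induction hn : seq.length - k generalizing k ps with
  | zero =>
      have hk' : k = seq.length := by omega
      subst hk'
      rw [outerA]
      simp [specPS]
  | succ n ih =>
      have hlt : k < seq.length := by omega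
      have hdrop : seq.drop k = seq[k] :: seq.drop (k + 1) := List.drop_eq_getElem_cons hlt
      have hget : PySem.List.pyGetD seq (k : Int) [] = seq[k] := by
        rw [PySem.List.pyGetD_natCast, List.getD_eq_getElem seq [] hlt]
      have hcast : (k : Int) + 1 = ((k + 1 : Nat) : Int) := by push_cast; ring
      rw [outerA, dif_pos (by exact_mod_cast hlt), hget, hcast,
        ih (k + 1) (by omega) _ (by omega)]
      have hspec : specPS (PySem.Chars.split₀ its) (seq.drop k) (k : Int) =
          (if interB seq[k] (PySem.Chars.split₀ its) ≠ [' '] ∧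
              ∀ t ∈ seq.drop (k + 1), PySem.Chars.isIn (interB seq[k] (PySem.Chars.split₀ its)) (interB t (PySem.Chars.split₀ its)) = false
           then (k : Int) :: specPS (PySem.Chars.split₀ its) (seq.drop (k + 1)) ((k : Int) + 1)
           else specPS (PySem.Chars.split₀ its) (seq.drop (k + 1)) ((k : Int) + 1)) := by
        rw [hdrop]; rfl
      have hcond : (interA seq[k] its ≠ [' '] ∧
          innerA seq its (interA seq[k] its) (seq.length : Int) ((k + 1 : Nat) : Int) = (seq.length : Int)) ↔
          (interB seq[k] (PySem.Chars.split₀ its) ≠ [' '] ∧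
          ∀ t ∈ seq.drop (k + 1), PySem.Chars.isIn (interB seq[k] (PySem.Chars.split₀ its)) (interB t (PySem.Chars.split₀ its)) = false) := by
        rw [innerA_eq_x_iff seq its _ (k + 1) (by omega)]
        constructor
        · rintro ⟨h1, h2⟩
          refine ⟨by rw [← interA_eq_interB]; exact h1, fun t ht => ?_⟩
          have := h2 t ht
          rwa [interA_eq_interB, interA_eq_interB] at this
        · rintro ⟨h1, h2⟩
          refine ⟨by rw [interA_eq_interB]; exact h1, fun t ht => ?_⟩
          rw [interA_eq_interB, interA_eq_interB]
          exact h2 t ht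
      rw [hspec, hcast]
      by_cases hA : interA seq[k] its ≠ [' ']
      · by_cases hI : innerA seq its (interA seq[k] its) (seq.length : Int) ((k + 1 : Nat) : Int) = (seq.length : Int)
        · rw [if_pos hA, if_pos hI, if_pos (hcond.mp ⟨hA, hI⟩)]
          simp
        · rw [if_pos hA, if_neg hI, if_neg (fun h => hI (hcond.mpr h).2)]
      · rw [if_neg hA, if_neg (fun h => hA (hcond.mpr h).1)]

lemma altFold (w2 : List (List Char)) (seqL : List (List Char)) (a : Nat) :
    (((List.range' a seqL.length).map (fun (n : Nat) => (n : Int))).zip seqL).foldr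
      (fun p (st : List (List Char) × List Int) =>
        (st.1 ++ [interB p.2 w2],
         if interB p.2 w2 ≠ [' '] ∧ ∀ L ∈ st.1, PySem.Chars.isIn (interB p.2 w2) L = false
         then st.2 ++ [p.1] else st.2)) ([], [])
    = ((seqL.map (fun t => interB t w2)).reverse, (specPS w2 seqL (a : Int)).reverse) := by
  induction seqL generalizing a with
  | nil => simp [specPS]
  | cons s rest ih =>
      rw [List.length_cons, List.range'_succ, List.map_cons, List.zip_cons_cons, List.foldr_cons,
        ih (a + 1)]
      have hall : (∀ L ∈ (rest.map (fun t => interB t w2)).reverse,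
          PySem.Chars.isIn (interB s w2) L = false) ↔
          (∀ t ∈ rest, PySem.Chars.isIn (interB s w2) (interB t w2) = false) := by
        simp
      have hcast : ((a : Int) + 1) = (((a + 1 : Nat)) : Int) := by push_cast; ring
      simp only [specPS]
      by_cases hc : interB s w2 ≠ [' '] ∧
          ∀ t ∈ rest, PySem.Chars.isIn (interB s w2) (interB t w2) = false
      · rw [if_pos ⟨hc.1, hall.mpr hc.2⟩, if_pos hc, hcast, List.map_cons, List.reverse_cons,
          List.reverse_cons]
      · rw [if_neg (fun h => hc ⟨h.1, hall.mp h.2⟩), if_neg hc, hcast, List.map_cons,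
          List.reverse_cons]

-- ===== VERDICT (by name: the statement is the Claim_ definition above) =====
theorem positionSet_spec : Claim_equal_positionSet := by
  intro sequence itemset _
  unfold Spec_positionSet positionSet positionSet_alt
  rw [List.foldl_reverse, List.range_eq_range']
  have hlen : sequence.length = (sequence.map String.toList).length := by simp
  rw [hlen, altFold (PySem.Chars.split₀ itemset.toList) (sequence.map String.toList) 0,
    show ((0 : Nat) : Int) = (0 : Int) from rfl,
    show (0 : Int) = ((0 : Nat) : Int) from rfl,
    outerA_eq (sequence.map String.toList) itemset.toList 0 (by omega) []]
  simp
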